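-- pv_equiv track=rewrite | github.com/haojian/paperWritingAgents | agents/professor_feedback.py | _identify_overall_strengths
-- ===== SOURCE A (Python) =====
-- from typing import Dict, List, Optional
--
-- def _identify_overall_strengths(paper: Dict[str, str], topic: str) -> List[str]:
--     """Identify overall strengths of the paper."""
--     strengths = []
--
--     # Structure
--     if len(paper) >= 4:
--         strengths.append("The paper has a good structure with multiple sections")
--
--     # Coverage
--     total_words = sum(len(content.split()) for content in paper.values())
--     if total_words >= 2000:
--         strengths.append("The paper provides comprehensive coverage of the topic")
--
--     # Academic tone
--     all_content = " ".join(paper.values())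
--     if not any(word in all_content.lower() for word in ['gonna', 'wanna', 'lol', 'omg']):
--         strengths.append("The paper maintains an appropriate academic tone throughout")
--
--     return strengths
-- ===== SOURCE B (Python) =====
-- from typing import Dict, List
--
-- INFORMAL = ['gonna', 'wanna', 'lol', 'omg']
--
-- def _stats(values: List[str]):
--     """Recursively compute (total word count, informal-word flag) over the values."""
--     if not values:
--         return 0, False
--     head, rest = values[0], values[1:]
--     words, informal = _stats(rest)
--     low = head.lower()
--     return words + len(head.split()), informal or any(w in low for w in INFORMAL)
--
-- def _identify_overall_strengths(paper: Dict[str, str], topic: str) -> List[str]: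
--     """Identify overall strengths: recursive stats, then a declarative check table."""
--     total_words, has_informal = _stats(list(paper.values()))
--     checks = [
--         (len(paper) >= 4, "The paper has a good structure with multiple sections"),
--         (total_words >= 2000, "The paper provides comprehensive coverage of the topic"),
--         (not has_informal, "The paper maintains an appropriate academic tone throughout"),
--     ]
--     return [msg for ok, msg in checks if ok]
-- ===== Notes on version B (the rewrite author's own statement) =====
-- stated objective: alternative
-- what changed: B replaces A's three staged scans (len check, generator-sum over values, substring scan of the space-joined full text) by a structural recursion over the value list computing (word count, informal flag) in one descent -- correct because the joined text contains an informal word iff some single value does, the ' ' separator blocking cross-boundary matches -- and then selects messages from a declarative (condition, message) table instead of an append chain.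
import Mathlib
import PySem

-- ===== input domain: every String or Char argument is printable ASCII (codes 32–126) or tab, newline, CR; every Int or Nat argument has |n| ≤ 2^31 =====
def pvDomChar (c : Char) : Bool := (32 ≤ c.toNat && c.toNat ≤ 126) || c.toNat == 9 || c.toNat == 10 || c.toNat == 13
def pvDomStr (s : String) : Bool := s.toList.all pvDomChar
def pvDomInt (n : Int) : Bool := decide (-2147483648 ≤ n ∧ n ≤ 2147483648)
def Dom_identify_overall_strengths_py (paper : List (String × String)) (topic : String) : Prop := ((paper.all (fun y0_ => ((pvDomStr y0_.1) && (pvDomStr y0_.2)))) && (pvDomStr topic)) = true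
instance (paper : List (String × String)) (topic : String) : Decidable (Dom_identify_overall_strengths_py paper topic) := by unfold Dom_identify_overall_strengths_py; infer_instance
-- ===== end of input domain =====

-- B replaces A's three staged scans (plus the space-joined full-text substring scan) by a structural
-- recursion over the value list computing (word count, informal flag), then selects messages from a
-- declarative (condition, message) table (objective: alternative).

-- the informal words both Python sources test for (the same literal list in both)
def pvInformalWords : List String := ["gonna", "wanna", "lol", "omg"]

-- ===== PORT A =====
def identify_overall_strengths_py (paper : List (String × String)) (topic : String) : List String :=
  -- strengths = []
  let strengths : List String := []
  -- if len(paper) >= 4: strengths.append(...)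
  let strengths := if paper.length ≥ 4 then strengths ++ ["The paper has a good structure with multiple sections"] else strengths
  -- total_words = sum(len(content.split()) for content in paper.values())
  let total_words : Int := (paper.map (fun kv => ((PySem.Str.split₀ kv.2).length : Int))).sum
  let strengths := if total_words ≥ 2000 then strengths ++ ["The paper provides comprehensive coverage of the topic"] else strengths
  -- all_content = " ".join(paper.values())
  let all_content := PySem.Str.join " " (paper.map (·.2))
  -- if not any(word in all_content.lower() for word in [...]): strengths.append(...)
  let strengths := if !(pvInformalWords.any (fun w => PySem.Str.isIn w (PySem.Str.lower all_content))) then strengths ++ ["The paper maintains an appropriate academic tone throughout"] else strengths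
  strengths

-- ===== PORT B =====
-- _stats: structural recursion over the values returning (total word count, informal flag)
def pvStats : List String → Int × Bool
  | [] => (0, false)
  | head :: rest =>
    let r := pvStats rest
    (r.1 + ((PySem.Str.split₀ head).length : Int),
     r.2 || pvInformalWords.any (fun w => PySem.Str.isIn w (PySem.Str.lower head)))

-- recursive stats, then a declarative check table, filtered
def identify_overall_strengths_py_alt (paper : List (String × String)) (topic : String) : List String :=
  let st := pvStats (paper.map (·.2))
  let checks : List (Bool × String) := [
    (decide (paper.length ≥ 4), "The paper has a good structure with multiple sections"),
    (decide (st.1 ≥ 2000), "The paper provides comprehensive coverage of the topic"),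
    (!st.2, "The paper maintains an appropriate academic tone throughout")]
  (checks.filter (·.1)).map (·.2)

-- ===== PRECONDITION & SPEC =====
def Spec_identify_overall_strengths_py (paper : List (String × String)) (topic : String) (out : List String) : Prop := out = identify_overall_strengths_py_alt paper topic
instance (paper : List (String × String)) (topic : String) (out : List String) : Decidable (Spec_identify_overall_strengths_py paper topic out) := by unfold Spec_identify_overall_strengths_py; infer_instance

-- ===== CLAIM (what is proved, stated in full; the proofs are below) =====
def Claim_equal_identify_overall_strengths_py : Prop := ∀ (paper : List (String × String)) (topic : String), Dom_identify_overall_strengths_py paper topic → Spec_identify_overall_strengths_py paper topic (identify_overall_strengths_py paper topic)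

-- ===== LEMMAS AND PROOFS =====

-- a prefix of xs ++ c :: ys that avoids c is a prefix of xs
lemma pv_prefix_of_avoid {α : Type} (w : List α) (xs ys : List α) (c : α)
    (hc : c ∉ w) (h : w <+: xs ++ c :: ys) : w <+: xs := by
  induction w generalizing xs with
  | nil => simp
  | cons a w ih =>
    cases xs with
    | nil =>
      rw [List.nil_append, List.cons_prefix_cons] at h
      exact absurd (h.1 ▸ List.mem_cons_self) hc
    | cons x xs =>
      rw [List.cons_append, List.cons_prefix_cons] at h
      exact List.cons_prefix_cons.mpr ⟨h.1, ih xs (fun hm => hc (List.mem_cons_of_mem _ hm)) h.2⟩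

-- an infix of xs ++ c :: ys that avoids c lies inside xs or inside ys
lemma pv_infix_append_cons {α : Type} (w : List α) (xs ys : List α) (c : α)
    (hc : c ∉ w) : w <:+: xs ++ c :: ys ↔ w <:+: xs ∨ w <:+: ys := by
  constructor
  · intro h
    induction xs with
    | nil =>
      rw [List.nil_append, List.infix_cons_iff] at h
      cases h with
      | inl hp =>
        cases w with
        | nil => exact Or.inl List.nil_infix
        | cons a w =>
          rw [List.cons_prefix_cons] at hp
          exact absurd (hp.1 ▸ List.mem_cons_self) hc
      | inr h => exact Or.inr h
    | cons x xs ih =>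
      rw [List.cons_append, List.infix_cons_iff] at h
      cases h with
      | inl hp =>
        cases w with
        | nil => exact Or.inl List.nil_infix
        | cons a w =>
          rw [List.cons_prefix_cons] at hp
          have hw' : w <+: xs := pv_prefix_of_avoid w xs ys c (fun hm => hc (List.mem_cons_of_mem _ hm)) hp.2
          exact Or.inl (List.cons_prefix_cons.mpr ⟨hp.1, hw'⟩).isInfix
      | inr h =>
        rcases ih h with h1 | h2
        · exact Or.inl (List.infix_cons h1)
        · exact Or.inr h2
  · rintro (h | h)
    · exact h.trans (List.prefix_append xs (c :: ys)).isInfix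
    · exact h.trans ((List.suffix_cons c ys).trans (List.suffix_append xs (c :: ys))).isInfix

-- a nonempty space-free word occurs in ' '.join(ps) iff it occurs in some part
lemma pv_isIn_join (w : List Char) (hc : (' ' : Char) ∉ w) (hw : w ≠ []) (ps : List (List Char)) :
    PySem.Chars.isIn w (PySem.Chars.join [' '] ps) = ps.any (fun p => PySem.Chars.isIn w p) := by
  induction ps with
  | nil =>
    rw [PySem.Chars.join_nil, List.any_nil, PySem.Chars.isIn_eq_false_iff]
    intro h
    exact hw (List.eq_nil_of_infix_nil h)
  | cons p ps ih =>
    cases ps with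
    | nil => simp [PySem.Chars.join_singleton]
    | cons q rest =>
      rw [PySem.Chars.join_cons_cons, List.append_assoc, List.any_cons]
      rw [show ([' '] ++ PySem.Chars.join [' '] (q :: rest)) = (' ' :: PySem.Chars.join [' '] (q :: rest)) from rfl]
      rw [Bool.eq_iff_iff, PySem.Chars.isIn_iff_infix, pv_infix_append_cons w p _ ' ' hc]
      rw [Bool.or_eq_true, ← ih]
      simp only [PySem.Chars.isIn_iff_infix]

-- lowering commutes with the space join (lowerChar ' ' = ' ')
lemma pv_lower_join (ps : List (List Char)) :
    PySem.Chars.lower (PySem.Chars.join [' '] ps) = PySem.Chars.join [' '] (ps.map PySem.Chars.lower) := by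
  induction ps with
  | nil => simp [PySem.Chars.join_nil, PySem.Chars.lower]
  | cons p ps ih =>
    cases ps with
    | nil => simp [PySem.Chars.join_singleton]
    | cons q rest =>
      rw [PySem.Chars.join_cons_cons,
          show List.map PySem.Chars.lower (p :: q :: rest) = PySem.Chars.lower p :: PySem.Chars.lower q :: List.map PySem.Chars.lower rest from rfl,
          PySem.Chars.join_cons_cons,
          show (PySem.Chars.lower q :: List.map PySem.Chars.lower rest) = List.map PySem.Chars.lower (q :: rest) from rfl,
          ← ih]
      simp only [PySem.Chars.lower, List.map_append, List.map_cons, List.map_nil]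
      have h' : PySem.Chars.lowerChar ' ' = ' ' := by decide
      rw [h']

-- the String-level form for a single word
lemma pv_isIn_lower_join (w : String) (hc : (' ' : Char) ∉ w.toList) (hw : w.toList ≠ [])
    (values : List String) :
    PySem.Str.isIn w (PySem.Str.lower (PySem.Str.join " " values))
      = values.any (fun v => PySem.Str.isIn w (PySem.Str.lower v)) := by
  rw [PySem.Str.isIn_eq, PySem.Str.toList_lower, PySem.Str.toList_join]
  rw [show (" " : String).toList = [' '] from rfl]
  rw [pv_lower_join, pv_isIn_join w.toList hc hw]
  rw [Bool.eq_iff_iff, List.any_eq_true, List.any_eq_true]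
  constructor
  · rintro ⟨p, hp, h⟩
    rw [List.mem_map] at hp
    obtain ⟨x, hx, rfl⟩ := hp
    rw [List.mem_map] at hx
    obtain ⟨v, hv, rfl⟩ := hx
    exact ⟨v, hv, by rw [PySem.Str.isIn_eq, PySem.Str.toList_lower]; exact h⟩
  · rintro ⟨v, hv, h⟩
    refine ⟨PySem.Chars.lower v.toList, List.mem_map.mpr ⟨v.toList, List.mem_map.mpr ⟨v, hv, rfl⟩, rfl⟩, ?_⟩
    rw [PySem.Str.isIn_eq, PySem.Str.toList_lower] at h; exact h

-- A's scan of the joined text agrees with a per-value flag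
lemma pv_tone_eq (values : List String) :
    (pvInformalWords.any (fun w => PySem.Str.isIn w (PySem.Str.lower (PySem.Str.join " " values))))
      = values.any (fun v => pvInformalWords.any (fun w => PySem.Str.isIn w (PySem.Str.lower v))) := by
  simp only [pvInformalWords, List.any_cons, List.any_nil, Bool.or_false]
  rw [pv_isIn_lower_join "gonna" (by decide) (by decide),
      pv_isIn_lower_join "wanna" (by decide) (by decide),
      pv_isIn_lower_join "lol" (by decide) (by decide),
      pv_isIn_lower_join "omg" (by decide) (by decide)]
  rw [Bool.eq_iff_iff]
  simp only [Bool.or_eq_true, List.any_eq_true]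
  constructor
  · rintro (⟨v,hv,h⟩|⟨v,hv,h⟩|⟨v,hv,h⟩|⟨v,hv,h⟩)
    · exact ⟨v, hv, Or.inl h⟩
    · exact ⟨v, hv, Or.inr (Or.inl h)⟩
    · exact ⟨v, hv, Or.inr (Or.inr (Or.inl h))⟩
    · exact ⟨v, hv, Or.inr (Or.inr (Or.inr h))⟩
  · rintro ⟨v, hv, h⟩
    rcases h with h|h|h|h
    · exact Or.inl ⟨v, hv, h⟩
    · exact Or.inr (Or.inl ⟨v, hv, h⟩)
    · exact Or.inr (Or.inr (Or.inl ⟨v, hv, h⟩))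
    · exact Or.inr (Or.inr (Or.inr ⟨v, hv, h⟩))

-- B's recursion computes the word-count sum and the informal-word disjunction
lemma pv_stats_eq (l : List String) :
    pvStats l = ((l.map (fun c => ((PySem.Str.split₀ c).length : Int))).sum,
                 l.any (fun c => pvInformalWords.any (fun w => PySem.Str.isIn w (PySem.Str.lower c)))) := by
  induction l with
  | nil => rfl
  | cons c rest ih =>
    simp only [pvStats, ih, List.map_cons, List.sum_cons, List.any_cons, Prod.mk.injEq]
    exact ⟨by ring, by rw [Bool.or_comm]⟩

-- ===== VERDICT (by name: the statement is the Claim_ definition above) =====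
theorem identify_overall_strengths_py_spec : Claim_equal_identify_overall_strengths_py := by
  intro paper topic _
  unfold Spec_identify_overall_strengths_py
  simp only [identify_overall_strengths_py, identify_overall_strengths_py_alt, pv_stats_eq]
  have htone : (pvInformalWords.any fun w => PySem.Str.isIn w (PySem.Str.lower (PySem.Str.join " " (paper.map (·.2)))))
      = paper.any (fun kv => pvInformalWords.any fun w => PySem.Str.isIn w (PySem.Str.lower kv.2)) := by
    rw [pv_tone_eq (paper.map (·.2)), List.any_map]
    rfl
  rw [htone]
  have hmap : (paper.map (·.2)).map (fun c => ((PySem.Str.split₀ c).length : Int))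
      = paper.map (fun kv => ((PySem.Str.split₀ kv.2).length : Int)) := by
    rw [List.map_map]; rfl
  have hany : (paper.map (·.2)).any (fun c => pvInformalWords.any (fun w => PySem.Str.isIn w (PySem.Str.lower c)))
      = paper.any (fun kv => pvInformalWords.any fun w => PySem.Str.isIn w (PySem.Str.lower kv.2)) := by
    rw [List.any_map]; rfl
  rw [hmap, hany]
  cases h3 : paper.any (fun v => pvInformalWords.any (fun w => PySem.Str.isIn w (PySem.Str.lower v.2))) <;>
    by_cases h1 : paper.length ≥ 4 <;>
    by_cases h2 : ((paper.map (fun kv => ((PySem.Str.split₀ kv.2).length : Int))).sum) ≥ 2000 <;>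
    simp [h1, h2, List.filter, List.map]
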